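-- pv_equiv track=rewrite | github.com/2020134026LWJ/TU_Capstone_Design | 코드 모음/경로 설정 알고리즘 코드/aster_Algorithm/aster_priority.py | build_time_indexed_positions
-- ===== SOURCE A (Python) =====
-- def build_time_indexed_positions(paths):
--     """
--     paths: 로봇별 [(x,y,t), ...]
--     각 t마다 로봇의 위치를 얻기 쉽게 변환
--     반환: positions[robot_id][t] = (x,y)
--     """
--     num_robots = len(paths)
--     last_t = 0
--     for p in paths:
--         if p:
--             last_t = max(last_t, p[-1][2])
--
--     positions = []
--     for rid in range(num_robots):
--         p = paths[rid]
--         pos_at_time = []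
--         if not p:
--             positions.append(pos_at_time)
--             continue
--
--         # t=0부터 last_t까지 각 시점 위치 채우기
--         idx = 0
--         cur_x, cur_y, cur_t = p[0]
--         for t in range(last_t + 1):
--             # path에서 t에 해당하는 상태를 찾거나, 이미 지난 좌표 유지
--             while idx + 1 < len(p) and p[idx + 1][2] <= t:
--                 idx += 1
--             cur_x, cur_y, cur_t = p[idx]
--             pos_at_time.append((cur_x, cur_y))
--         positions.append(pos_at_time)
--
--     return positions, last_t
-- ===== SOURCE B (Python) =====
-- def build_time_indexed_positions(paths):
--     # Segment-fill re-implementation: instead of advancing a pointer at every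
--     # timestep, walk the path entries once and fill each contiguous t-range
--     # (clamped to [0, last_t]) with the repeated (x, y) of its segment.
--     last_t = 0
--     for p in paths:
--         if p:
--             last_t = max(last_t, p[-1][2])
--     limit = last_t + 1
--
--     positions = []
--     for p in paths:
--         if not p:
--             positions.append([])
--             continue
--         pos_at_time = []
--         cur_xy = (p[0][0], p[0][1])
--         start = 0   # next timestep still to fill, always in [0, limit]
--         run = None  # running max of entry timestamps seen so far
--         for (x, y, tt) in p[1:]:
--             run = tt if run is None else max(run, tt)
--             end = min(run, limit)
--             if end > start:
--                 pos_at_time.extend([cur_xy] * (end - start))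
--                 start = end
--             cur_xy = (x, y)
--         pos_at_time.extend([cur_xy] * (limit - start))
--         positions.append(pos_at_time)
--
--     return positions, last_t
-- ===== Notes on version B (the rewrite author's own statement) =====
-- stated objective: alternative
-- what changed: Replaces A's per-timestep scan (advancing a path pointer with an inner while for every t) by a single pass over each path's entries that bulk-fills each contiguous active t-range with its repeated (x, y), using a running-max entry time clamped to [0, last_t+1].
import Mathlib
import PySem

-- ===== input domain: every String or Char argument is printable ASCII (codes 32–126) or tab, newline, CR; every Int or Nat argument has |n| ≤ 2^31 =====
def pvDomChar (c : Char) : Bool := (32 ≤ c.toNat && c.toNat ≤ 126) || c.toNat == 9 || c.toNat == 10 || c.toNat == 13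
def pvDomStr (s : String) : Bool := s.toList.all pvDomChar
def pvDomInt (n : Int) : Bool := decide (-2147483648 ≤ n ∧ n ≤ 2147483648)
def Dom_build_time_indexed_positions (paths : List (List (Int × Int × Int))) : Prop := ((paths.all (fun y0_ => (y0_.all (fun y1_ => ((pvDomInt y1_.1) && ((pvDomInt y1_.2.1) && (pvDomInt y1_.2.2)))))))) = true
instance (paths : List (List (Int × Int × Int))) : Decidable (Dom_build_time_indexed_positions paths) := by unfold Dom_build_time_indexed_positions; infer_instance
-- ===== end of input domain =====

-- B replaces A's per-timestep pointer scan by a single pass over the path's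
-- entries that bulk-fills each contiguous t-range with its repeated (x, y)
-- (objective: alternative algorithm, same cost on typical inputs).

-- ===== PORT A =====
-- last_t loop shared shape; each port has its own copy.
def pvLastTA (paths : List (List (Int × Int × Int))) : Int :=
  paths.foldl (fun lt p => if p = [] then lt else max lt (PySem.List.pyGetD p (-1) (0, 0, 0)).2.2) 0

-- the inner 'while idx + 1 < len(p) and p[idx+1][2] <= t: idx += 1'
def pvAdvance (p : List (Int × Int × Int)) (idx : Nat) (t : Int) : Nat :=
  if h : idx + 1 < p.length ∧ (PySem.List.pyGetD p ((idx : Int) + 1) (0, 0, 0)).2.2 ≤ t then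
    pvAdvance p (idx + 1) t
  else idx
termination_by p.length - idx
decreasing_by omega

-- one iteration of 'for t in range(last_t + 1)'; state = (idx, pos_at_time)
-- (p[idx] is always in range in A, so getD via pyGetD is exact)
def pvStepA (p : List (Int × Int × Int)) (st : Nat × List (Int × Int)) (t : Int) :
    Nat × List (Int × Int) :=
  let idx := pvAdvance p st.1 t
  let c := PySem.List.pyGetD p (idx : Int) (0, 0, 0)
  (idx, st.2 ++ [(c.1, c.2.1)])

def pvPathA (p : List (Int × Int × Int)) (last_t : Int) : List (Int × Int) :=
  ((PySem.List.pyRange 0 (last_t + 1) 1).foldl (pvStepA p) (0, [])).2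

def build_time_indexed_positions (paths : List (List (Int × Int × Int))) :
    (List (List (Int × Int))) × Int :=
  let last_t := pvLastTA paths
  let positions := (PySem.List.pyRange 0 (paths.length : Int) 1).foldl
    (fun pos rid =>
      let p := PySem.List.pyGetD paths rid []
      if p = [] then pos ++ [([] : List (Int × Int))]
      else pos ++ [pvPathA p last_t]) []
  (positions, last_t)

-- ===== PORT B =====
def pvLastTB (paths : List (List (Int × Int × Int))) : Int :=
  paths.foldl (fun lt p => if p = [] then lt else max lt (PySem.List.pyGetD p (-1) (0, 0, 0)).2.2) 0

-- 'run = tt if run is None else max(run, tt)'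
def pvRun (run : Option Int) (tt : Int) : Int :=
  match run with | none => tt | some r => max r tt

-- one iteration of B's 'for (x, y, tt) in p[1:]'; state = (pos_at_time, cur_xy, start, run)
def pvStepB (limit : Int) (st : List (Int × Int) × (Int × Int) × Int × Option Int)
    (e : Int × Int × Int) : List (Int × Int) × (Int × Int) × Int × Option Int :=
  let run : Int := pvRun st.2.2.2 e.2.2
  let ed := min run limit
  if st.2.2.1 < ed then
    (st.1 ++ PySem.List.pyRepeat [st.2.1] (ed - st.2.2.1), (e.1, e.2.1), ed, some run)
  else
    (st.1, (e.1, e.2.1), st.2.2.1, some run)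

def pvPathB (limit : Int) (h : Int × Int × Int) (rest : List (Int × Int × Int)) :
    List (Int × Int) :=
  let st := rest.foldl (pvStepB limit) ([], (h.1, h.2.1), 0, none)
  st.1 ++ PySem.List.pyRepeat [st.2.1] (limit - st.2.2.1)

def build_time_indexed_positions_alt (paths : List (List (Int × Int × Int))) :
    (List (List (Int × Int))) × Int :=
  let last_t := pvLastTB paths
  let limit := last_t + 1
  (paths.map (fun p => match p with
    | [] => ([] : List (Int × Int))
    | h :: rest => pvPathB limit h rest), last_t)

-- ===== PRECONDITION & SPEC =====
def Spec_build_time_indexed_positions (paths : List (List (Int × Int × Int))) (out : (List (List (Int × Int))) × Int) : Prop := out = build_time_indexed_positions_alt paths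
instance (paths : List (List (Int × Int × Int))) (out : (List (List (Int × Int))) × Int) : Decidable (Spec_build_time_indexed_positions paths out) := by unfold Spec_build_time_indexed_positions; infer_instance

-- ===== CLAIM (what is proved, stated in full; the proofs are below) =====
def Claim_equal_build_time_indexed_positions : Prop := ∀ (paths : List (List (Int × Int × Int))), Dom_build_time_indexed_positions paths → Spec_build_time_indexed_positions paths (build_time_indexed_positions paths)

-- ===== LEMMAS AND PROOFS =====

-- length of the prefix of rest that A's pointer has passed by time t
def twl : List (Int × Int × Int) → Int → Nat
  | [], _ => 0
  | e :: rs, t => if e.2.2 ≤ t then twl rs t + 1 else 0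

-- the (x, y) A reports at time t, as a structural recursion
def pickTW : List (Int × Int × Int) → (Int × Int) → Int → (Int × Int)
  | [], cur, _ => cur
  | e :: rs, cur, t => if e.2.2 ≤ t then pickTW rs (e.1, e.2.1) t else cur

-- the (x, y) emitted at time t from B's mid-fold state (cur, run)
def selS : List (Int × Int × Int) → (Int × Int) → Option Int → Int → (Int × Int)
  | [], cur, _, _ => cur
  | e :: rs, cur, run, t =>
    if pvRun run e.2.2 ≤ t then selS rs (e.1, e.2.1) (some (pvRun run e.2.2)) t else cur

-- B's invariant value of 'start'
def clampR (limit : Int) : Option Int → Int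
  | none => 0
  | some r => min (max r 0) limit

theorem twl_le_length (rs : List (Int × Int × Int)) (t : Int) : twl rs t ≤ rs.length := by
  induction rs with
  | nil => simp [twl]
  | cons e rs ih => simp only [twl, List.length_cons]; split <;> omega

theorem twl_mono (rs : List (Int × Int × Int)) {t t' : Int} (h : t ≤ t') :
    twl rs t ≤ twl rs t' := by
  induction rs with
  | nil => simp [twl]
  | cons e rs ih => simp only [twl]; split_ifs with h1 h2 <;> omega

theorem twl_getD_lt (rs : List (Int × Int × Int)) (t : Int) (j : Nat) (hj : j < twl rs t) :
    (rs.getD j (0, 0, 0)).2.2 ≤ t := by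
  induction rs generalizing j with
  | nil => simp [twl] at hj
  | cons e rs ih =>
    simp only [twl] at hj
    split_ifs at hj with h1
    · cases j with
      | zero => simpa using h1
      | succ j => simpa using ih j (by omega)
    · omega

theorem twl_getD_stop (rs : List (Int × Int × Int)) (t : Int) (hl : twl rs t < rs.length) :
    t < (rs.getD (twl rs t) (0, 0, 0)).2.2 := by
  induction rs with
  | nil => simp at hl
  | cons e rs ih =>
    simp only [twl, List.length_cons] at hl ⊢
    split_ifs at hl ⊢ with h1
    · have hlt : twl rs t < rs.length := by omega
      simpa [List.getD_cons_succ] using ih hlt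
    · simpa using lt_of_not_ge h1

theorem pvAdvance_eq (fuel : Nat) (h : Int × Int × Int) (rs : List (Int × Int × Int))
    (t : Int) (j : Nat) (hfuel : rs.length - j ≤ fuel) (hj : j ≤ twl rs t) :
    pvAdvance (h :: rs) j t = twl rs t := by
  induction fuel generalizing j with
  | zero =>
    have hlen := twl_le_length rs t
    have hje : j = twl rs t := by omega
    rw [pvAdvance]
    have hnc : ¬ (j + 1 < (h :: rs).length ∧ (PySem.List.pyGetD (h :: rs) ((j : Nat) + 1) (0, 0, 0)).2.2 ≤ t) := by
      intro hc
      have := hc.1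
      simp only [List.length_cons] at this
      omega
    rw [dif_neg hnc]
    exact hje
  | succ fuel ih =>
    rw [pvAdvance]
    have hcast : ((j : Int) + 1) = ((j + 1 : Nat) : Int) := by push_cast; ring
    by_cases hlt : j < twl rs t
    · have hjl : j < rs.length := by have := twl_le_length rs t; omega
      have hc : j + 1 < (h :: rs).length ∧ (PySem.List.pyGetD (h :: rs) ((j : Int) + 1) (0, 0, 0)).2.2 ≤ t := by
        refine ⟨by simp only [List.length_cons]; omega, ?_⟩
        rw [hcast, PySem.List.pyGetD_natCast, List.getD_cons_succ]
        exact twl_getD_lt rs t j hlt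
      rw [dif_pos hc]
      exact ih (j + 1) (by omega) (by omega)
    · have hje : j = twl rs t := by omega
      have hnc : ¬ (j + 1 < (h :: rs).length ∧ (PySem.List.pyGetD (h :: rs) ((j : Int) + 1) (0, 0, 0)).2.2 ≤ t) := by
        intro hc
        have h1 := hc.1
        have h2 := hc.2
        rw [hcast, PySem.List.pyGetD_natCast, List.getD_cons_succ] at h2
        simp only [List.length_cons] at h1
        have := twl_getD_stop rs t (by omega)
        rw [← hje] at this
        omega
      rw [dif_neg hnc]
      exact hje

theorem getD_twl_eq_pickTW (rs : List (Int × Int × Int)) (h : Int × Int × Int) (t : Int) :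
    (((h :: rs).getD (twl rs t) (0, 0, 0)).1, ((h :: rs).getD (twl rs t) (0, 0, 0)).2.1)
      = pickTW rs (h.1, h.2.1) t := by
  induction rs generalizing h with
  | nil => simp [twl, pickTW]
  | cons e rs ih =>
    simp only [twl, pickTW]
    split_ifs with h1
    · simpa [List.getD_cons_succ] using ih e
    · simp

theorem selS_eq_pickTW (rs : List (Int × Int × Int)) (cur : Int × Int) (run : Option Int)
    (t : Int) (hrun : run = none ∨ ∃ r, run = some r ∧ r ≤ t) :
    selS rs cur run t = pickTW rs cur t := by
  induction rs generalizing cur run with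
  | nil => simp [selS, pickTW]
  | cons e rs ih =>
    rcases hrun with hn | ⟨r, hr, hrt⟩
    · subst hn
      simp only [selS, pickTW, pvRun]
      split_ifs with h1
      · exact ih _ _ (Or.inr ⟨e.2.2, rfl, h1⟩)
      · rfl
    · subst hr
      simp only [selS, pickTW, pvRun]
      by_cases h1 : e.2.2 ≤ t
      · rw [if_pos (by omega), if_pos h1]
        exact ih _ _ (Or.inr ⟨max r e.2.2, rfl, by omega⟩)
      · rw [if_neg (by omega), if_neg h1]

-- A's per-path loop computes pickTW pointwise
theorem foldA (n : Nat) (hn : 1 ≤ n) (h : Int × Int × Int) (rs : List (Int × Int × Int)) :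
    (PySem.List.pyRange 0 (n : Int) 1).foldl (pvStepA (h :: rs)) (0, [])
      = (twl rs ((n : Int) - 1),
         (PySem.List.pyRange 0 (n : Int) 1).map (fun t => pickTW rs (h.1, h.2.1) t)) := by
  induction n with
  | zero => omega
  | succ n ih =>
    by_cases hn1 : n = 0
    · subst hn1
      have h01 : ((1 : Nat) : Int) = 0 + 1 := by norm_num
      rw [h01, PySem.List.pyRange_one_singleton]
      simp only [List.foldl_cons, List.foldl_nil, List.map_cons, List.map_nil]
      have hadv : pvAdvance (h :: rs) 0 (0 : Int) = twl rs 0 :=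
        pvAdvance_eq rs.length h rs 0 0 (by omega) (by omega)
      simp only [pvStepA, hadv, Prod.mk.injEq]
      refine ⟨by norm_num, ?_⟩
      rw [PySem.List.pyGetD_natCast]
      simpa [List.getD_eq_getElem?_getD] using getD_twl_eq_pickTW rs h 0
    · have hn' : 1 ≤ n := by omega
      have hsplit : PySem.List.pyRange 0 ((n + 1 : Nat) : Int) 1
          = PySem.List.pyRange 0 (n : Int) 1 ++ [(n : Int)] := by
        rw [show ((n + 1 : Nat) : Int) = (n : Int) + 1 by push_cast; ring]
        exact PySem.List.pyRange_one_succ_right (by positivity)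
      rw [hsplit, List.foldl_append, List.map_append, ih hn']
      have hadv : pvAdvance (h :: rs) (twl rs ((n : Int) - 1)) (n : Int) = twl rs (n : Int) :=
        pvAdvance_eq rs.length h rs (n : Int) _ (by omega) (twl_mono rs (by omega))
      simp only [List.foldl_cons, List.foldl_nil, List.map_cons, List.map_nil, pvStepA, hadv,
        Prod.mk.injEq]
      refine ⟨by congr 1; push_cast; ring, ?_⟩
      rw [PySem.List.pyGetD_natCast]
      simpa [List.getD_eq_getElem?_getD] using getD_twl_eq_pickTW rs h (n : Int)

-- map of a constant over a range is a replicate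
theorem map_const_eq_replicate {α β : Type} (l : List α) (c : β) :
    l.map (fun _ => c) = List.replicate l.length c := by
  induction l with
  | nil => rfl
  | cons x l ih => simp only [List.map_cons, List.length_cons, List.replicate_succ, ih]

theorem map_const_pyRange {α : Type} (a b : Int) (c : α) :
    (PySem.List.pyRange a b 1).map (fun _ => c) = List.replicate (b - a).toNat c := by
  rw [PySem.List.pyRange_one, List.map_map]
  simp only [Function.comp_def]
  rw [map_const_eq_replicate, List.length_range]

-- B's fold invariant: from a mid-state, the remaining output is the pointwise map
theorem foldB (limit : Int) (hlim : 1 ≤ limit) (rs : List (Int × Int × Int)) :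
    ∀ (cur : Int × Int) (run : Option Int) (acc : List (Int × Int)),
    (rs.foldl (pvStepB limit) (acc, cur, clampR limit run, run)).1
      ++ PySem.List.pyRepeat [(rs.foldl (pvStepB limit) (acc, cur, clampR limit run, run)).2.1]
          (limit - (rs.foldl (pvStepB limit) (acc, cur, clampR limit run, run)).2.2.1)
      = acc ++ (PySem.List.pyRange (clampR limit run) limit 1).map (fun t => selS rs cur run t) := by
  induction rs with
  | nil =>
    intro cur run acc
    simp only [List.foldl_nil, selS]
    congr 1
    rw [PySem.List.pyRepeat_singleton, ← map_const_pyRange (clampR limit run) limit cur]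
  | cons e rs ih =>
    intro cur run acc
    have hstart0 : 0 ≤ clampR limit run := by
      cases run with
      | none => simp [clampR]
      | some r0 => simp only [clampR]; omega
    have hstartle : clampR limit run ≤ limit := by
      cases run with
      | none => simp only [clampR]; omega
      | some r0 => simp only [clampR]; omega
    simp only [List.foldl_cons, pvStepB]
    by_cases hlt : clampR limit run < min (pvRun run e.2.2) limit
    · rw [if_pos hlt]
      have hclamp : min (pvRun run e.2.2) limit = clampR limit (some (pvRun run e.2.2)) := by
        simp only [clampR]
        omega
      rw [hclamp]
      rw [ih (e.1, e.2.1) (some (pvRun run e.2.2))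
        (acc ++ PySem.List.pyRepeat [cur] (clampR limit (some (pvRun run e.2.2)) - clampR limit run))]
      rw [List.append_assoc]
      congr 1
      rw [PySem.List.pyRange_one_append (clampR limit run) (clampR limit (some (pvRun run e.2.2)))
        limit (by rw [← hclamp]; omega) (by simp only [clampR]; omega), List.map_append]
      congr 1
      · rw [List.map_congr_left (g := fun _ => cur) ?hc]
        case hc =>
          intro t ht
          rw [PySem.List.mem_pyRange_one] at ht
          simp only [selS]
          rw [if_neg (by rw [← hclamp] at ht; omega)]
        rw [PySem.List.pyRepeat_singleton, ← map_const_pyRange _ _ cur]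
      · refine List.map_congr_left ?_
        intro t ht
        rw [PySem.List.mem_pyRange_one] at ht
        simp only [selS]
        rw [if_pos (by simp only [clampR] at ht; omega)]
    · rw [if_neg hlt]
      have hclamp : clampR limit run = clampR limit (some (pvRun run e.2.2)) := by
        cases run with
        | none => simp only [pvRun, clampR] at hlt ⊢; omega
        | some r0 => simp only [pvRun, clampR] at hlt ⊢; omega
      rw [hclamp, ih (e.1, e.2.1) (some (pvRun run e.2.2)) acc, ← hclamp]
      congr 1
      refine List.map_congr_left ?_
      intro t ht
      rw [PySem.List.mem_pyRange_one] at ht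
      simp only [selS]
      rw [if_pos (by omega)]

theorem lastT_nonneg (paths : List (List (Int × Int × Int))) : 0 ≤ pvLastTA paths := by
  suffices h : ∀ (l : List (List (Int × Int × Int))) (init : Int),
      init ≤ l.foldl (fun lt p => if p = [] then lt else max lt (PySem.List.pyGetD p (-1) (0, 0, 0)).2.2) init by
    exact h paths 0
  intro l
  induction l with
  | nil => intro init; simp
  | cons p l ih =>
    intro init
    refine le_trans ?_ (ih _)
    dsimp only
    split <;> simp

theorem pathA_eq_pathB (p : List (Int × Int × Int)) (last_t : Int) (hlt : 0 ≤ last_t) :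
    (if p = [] then [] else pvPathA p last_t)
      = (match p with | [] => ([] : List (Int × Int)) | h :: rest => pvPathB (last_t + 1) h rest) := by
  cases p with
  | nil => simp
  | cons h rs =>
    simp only [List.cons_ne_nil, if_false]
    have hn : ((last_t + 1).toNat : Int) = last_t + 1 := by omega
    have h1 : 1 ≤ (last_t + 1).toNat := by omega
    -- A side
    have hA : pvPathA (h :: rs) last_t
        = (PySem.List.pyRange 0 (last_t + 1) 1).map (fun t => pickTW rs (h.1, h.2.1) t) := by
      unfold pvPathA
      rw [← hn, foldA _ h1 h rs]
    -- B side
    have hB : pvPathB (last_t + 1) h rs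
        = (PySem.List.pyRange 0 (last_t + 1) 1).map (fun t => selS rs (h.1, h.2.1) none t) := by
      unfold pvPathB
      have := foldB (last_t + 1) (by omega) rs (h.1, h.2.1) none []
      simpa [clampR] using this
    rw [hA, hB]
    refine List.map_congr_left ?_
    intro t _
    exact (selS_eq_pickTW rs (h.1, h.2.1) none t (Or.inl rfl)).symm

theorem outerA (lt : Int) (l : List (List (Int × Int × Int))) (acc : List (List (Int × Int))) :
    l.foldl (fun pos p => if p = [] then pos ++ [([] : List (Int × Int))] else pos ++ [pvPathA p lt]) acc
      = acc ++ l.map (fun p => if p = [] then [] else pvPathA p lt) := by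
  induction l generalizing acc with
  | nil => simp
  | cons p l ih =>
    simp only [List.foldl_cons, List.map_cons]
    split <;> rw [ih] <;> simp

-- ===== VERDICT (by name: the statement is the Claim_ definition above) =====
theorem build_time_indexed_positions_spec : Claim_equal_build_time_indexed_positions := by
  intro paths _
  unfold Spec_build_time_indexed_positions
  unfold build_time_indexed_positions build_time_indexed_positions_alt
  have hlastT : pvLastTB paths = pvLastTA paths := rfl
  rw [hlastT]
  refine Prod.ext ?_ rfl
  simp only
  rw [PySem.List.foldl_pyRange_zero_pyGetD' paths ([] : List (Int × Int × Int))
      (fun pos p => if p = [] then pos ++ [([] : List (Int × Int))] else pos ++ [pvPathA p (pvLastTA paths)]) []]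
  rw [outerA]
  simp only [List.nil_append]
  refine List.map_congr_left ?_
  intro p _
  exact pathA_eq_pathB p (pvLastTA paths) (lastT_nonneg paths)
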